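-- pv_equiv track=rewrite | github.com/anasm-17/DSA_collaborative_prep | Problem_sets/pyramid/pyramid_anasm-17.py | pyramids
-- ===== SOURCE A (Python) =====
-- def pyramids(n):
--     pyr_list = list(" "*((2*n) - 1))
--     out_list = []
--     for i in range(n):
--         pyr_list[(2*n - 1)//2 + i] = '#'
--         pyr_list[(2*n - 1)//2 - i] = '#'
--         out_list.append("".join(pyr_list))
--     return out_list
-- ===== SOURCE B (Python) =====
-- def pyramids(n):
--     return [" " * (n - 1 - i) + "#" * (2 * i + 1) + " " * (n - 1 - i)
--             for i in range(n)]
-- ===== Notes on version B (the rewrite author's own statement) =====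
-- stated objective: simpler
-- what changed: Each row is built independently from closed-form counts (n-1-i spaces, 2i+1 hashes, n-1-i spaces) instead of mutating one shared character buffer across iterations and re-joining it every row.
import Mathlib
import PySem

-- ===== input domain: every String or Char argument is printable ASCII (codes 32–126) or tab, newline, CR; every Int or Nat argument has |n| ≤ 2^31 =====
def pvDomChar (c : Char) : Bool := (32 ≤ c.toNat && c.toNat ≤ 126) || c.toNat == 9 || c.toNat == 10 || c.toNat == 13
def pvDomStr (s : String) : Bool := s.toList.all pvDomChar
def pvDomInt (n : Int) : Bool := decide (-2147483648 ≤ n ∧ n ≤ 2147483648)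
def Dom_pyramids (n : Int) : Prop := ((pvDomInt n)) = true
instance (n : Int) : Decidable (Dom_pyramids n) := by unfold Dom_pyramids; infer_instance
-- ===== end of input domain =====

-- B builds each row independently from closed-form counts instead of A's shared
-- mutable character buffer re-joined every iteration (objective: simpler).

-- ===== PORT A =====
-- list(" "*((2*n)-1)): Python string repetition yields "" for a non-positive count,
-- which .toNat's clamping reproduces exactly. The two index assignments use plain
-- List.set with .toNat: for every executed iteration (0 ≤ i < n) both indices are
-- nonnegative and in range, so this matches Python list assignment exactly there.
def pyramids (n : Int) : List String :=
  ((PySem.List.pyRange 0 n 1).foldl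
    (fun (st : List Char × List String) (i : Int) =>
      let p := st.1.set ((PySem.Int.floordiv (2*n - 1) 2 + i).toNat) '#'
      let p := p.set ((PySem.Int.floordiv (2*n - 1) 2 - i).toNat) '#'
      (p, st.2 ++ [String.mk p]))
    (List.replicate (2*n - 1).toNat ' ', ([] : List String))).2

-- ===== PORT B =====
-- list comprehension: each row is ' '*(n-1-i) + '#'*(2*i+1) + ' '*(n-1-i)
def pyramids_alt (n : Int) : List String :=
  (PySem.List.pyRange 0 n 1).map (fun i =>
    String.mk (List.replicate (n - 1 - i).toNat ' '
      ++ List.replicate (2*i + 1).toNat '#'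
      ++ List.replicate (n - 1 - i).toNat ' '))

-- ===== PRECONDITION & SPEC =====
def Spec_pyramids (n : Int) (out : List String) : Prop := out = pyramids_alt n
instance (n : Int) (out : List String) : Decidable (Spec_pyramids n out) := by unfold Spec_pyramids; infer_instance

-- ===== CLAIM (what is proved, stated in full; the proofs are below) =====
def Claim_equal_pyramids : Prop := ∀ (n : Int), Dom_pyramids n → Spec_pyramids n (pyramids n)

-- ===== LEMMAS AND PROOFS =====

/-- Row `j` of a pyramid with centre column `c` (width `2c+1`). -/
def rowChars (c j : ℕ) : List Char :=
  List.replicate (c - j) ' ' ++ List.replicate (2*j + 1) '#' ++ List.replicate (c - j) ' '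

/-- A's buffer after `k` iterations (centre column `c`). -/
def prevPyr (c : ℕ) : ℕ → List Char
  | 0 => List.replicate (2*c + 1) ' '
  | (k+1) => rowChars c k

lemma rowChars_length (c j : ℕ) (hj : j ≤ c) : (rowChars c j).length = 2*c + 1 := by
  simp [rowChars]; omega

lemma prevPyr_length (c k : ℕ) (hk : k ≤ c + 1) : (prevPyr c k).length = 2*c + 1 := by
  cases k with
  | zero => simp [prevPyr]
  | succ k => simpa [prevPyr] using rowChars_length c k (by omega)

lemma rowChars_getElem (c j t : ℕ) (hj : j ≤ c)
    (h : t < (rowChars c j).length) :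
    (rowChars c j)[t] = if c - j ≤ t ∧ t ≤ c + j then '#' else ' ' := by
  have hlen := rowChars_length c j hj
  unfold rowChars at h ⊢
  simp only [List.getElem_append, List.length_replicate, List.getElem_replicate,
    List.length_append] at h ⊢
  split_ifs <;> first | rfl | omega

lemma prevPyr_getElem (c k t : ℕ) (hk : k ≤ c)
    (h : t < (prevPyr c k).length) :
    (prevPyr c k)[t] = if 1 ≤ k ∧ c + 1 ≤ t + k ∧ t + 1 ≤ c + k then '#' else ' ' := by
  cases k with
  | zero => simp [prevPyr, List.getElem_replicate]
  | succ k =>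
      have h' : t < (rowChars c k).length := h
      have := rowChars_getElem c k t (by omega) h'
      refine this.trans ?_
      split_ifs <;> first | rfl | omega

/-- One iteration of A turns the previous buffer into row `k`. -/
lemma set_step (c k : ℕ) (hk : k ≤ c) :
    ((prevPyr c k).set (c + k) '#').set (c - k) '#' = rowChars c k := by
  apply List.ext_getElem
  · simp [prevPyr_length c k (by omega), rowChars_length c k hk]
  · intro t h1 h2
    have hlen : (prevPyr c k).length = 2*c + 1 := prevPyr_length c k (by omega)
    have ht : t < (prevPyr c k).length := by
      simpa using h1
    rw [List.getElem_set, List.getElem_set,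
        prevPyr_getElem c k t hk ht,
        rowChars_getElem c k t hk h2]
    split_ifs <;> first | rfl | omega

lemma floordiv_center (c : ℕ) :
    PySem.Int.floordiv (2*((c+1 : ℕ) : ℤ) - 1) 2 = (c : ℤ) := by
  rw [PySem.Int.floordiv_eq_ediv_of_pos (by norm_num)]
  omega

/-- Loop invariant for A's fold, with `n = c + 1`. -/
lemma loopA (c : ℕ) : ∀ (k : ℕ), k ≤ c + 1 →
    ((PySem.List.pyRange 0 (k : ℤ) 1).foldl
      (fun (st : List Char × List String) (i : ℤ) =>
        let p := st.1.set ((PySem.Int.floordiv (2*((c+1 : ℕ) : ℤ) - 1) 2 + i).toNat) '#'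
        let p := p.set ((PySem.Int.floordiv (2*((c+1 : ℕ) : ℤ) - 1) 2 - i).toNat) '#'
        (p, st.2 ++ [String.mk p]))
      (List.replicate (2*((c+1 : ℕ) : ℤ) - 1).toNat ' ', ([] : List String)))
    = (prevPyr c k, (List.range k).map (fun j => String.mk (rowChars c j))) := by
  have hrep : (2*((c+1 : ℕ) : ℤ) - 1).toNat = 2*c + 1 := by omega
  intro k hk
  induction k with
  | zero =>
      rw [show ((0:ℕ):ℤ) = 0 by norm_num, PySem.List.pyRange_one_eq_nil (by norm_num)]
      simp [prevPyr]
      omega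
  | succ k ih =>
      have hrange : PySem.List.pyRange 0 ((k+1 : ℕ) : ℤ) 1
          = PySem.List.pyRange 0 (k : ℤ) 1 ++ [(k : ℤ)] := by
        rw [show ((k+1 : ℕ) : ℤ) = (k : ℤ) + 1 by push_cast; ring]
        exact PySem.List.pyRange_one_succ_right (by positivity)
      rw [hrange, List.foldl_append, ih (by omega)]
      simp only [List.foldl_cons, List.foldl_nil, floordiv_center]
      have h1 : ((c : ℤ) + (k : ℤ)).toNat = c + k := by omega
      have h2 : ((c : ℤ) - (k : ℤ)).toNat = c - k := by omega
      rw [h1, h2, set_step c k (by omega)]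
      simp [List.range_succ, prevPyr]

lemma alt_row (c j : ℕ) (hj : j < c + 1) :
    (List.replicate (((c+1 : ℕ) : ℤ) - 1 - (0 + (j:ℤ))).toNat ' '
      ++ List.replicate (2*(0 + (j:ℤ)) + 1).toNat '#'
      ++ List.replicate (((c+1 : ℕ) : ℤ) - 1 - (0 + (j:ℤ))).toNat ' ') = rowChars c j := by
  have e1 : (((c+1 : ℕ) : ℤ) - 1 - (0 + (j:ℤ))).toNat = c - j := by omega
  have e2 : (2*(0 + (j:ℤ)) + 1).toNat = 2*j + 1 := by omega
  rw [e1, e2, rowChars]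

-- ===== VERDICT (by name: the statement is the Claim_ definition above) =====
theorem pyramids_spec : Claim_equal_pyramids := by
  intro n _
  unfold Spec_pyramids pyramids pyramids_alt
  by_cases hn : n ≤ 0
  · rw [PySem.List.pyRange_one_eq_nil hn]
    rfl
  · obtain ⟨c, rfl⟩ : ∃ c : ℕ, n = ((c + 1 : ℕ) : ℤ) :=
      ⟨(n - 1).toNat, by omega⟩
    rw [loopA c (c+1) (le_refl _)]
    rw [PySem.List.pyRange_one]
    have harg : (((c+1 : ℕ) : ℤ) - 0).toNat = c + 1 := by omega
    rw [harg, List.map_map]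
    apply List.map_congr_left
    intro j hj
    have hjlt : j < c + 1 := List.mem_range.mp hj
    simp only [Function.comp]
    rw [alt_row c j hjlt]
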